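-- pv_equiv track=rewrite | github.com/Ilya-Stetskiy/OpenFold3_project | openfold_notebooks/openfold3_runtime_benchmark/telemetry.py | parse_proc_status_text
-- ===== SOURCE A (Python) =====
-- def parse_proc_status_text(text: str) -> dict[str, int]:
--     values: dict[str, int] = {
--         "rss_bytes": 0,
--         "vms_bytes": 0,
--         "threads": 0,
--     }
--     for raw_line in text.splitlines():
--         if raw_line.startswith("VmRSS:"):
--             values["rss_bytes"] = int(raw_line.split()[1]) * 1024
--         elif raw_line.startswith("VmSize:"):
--             values["vms_bytes"] = int(raw_line.split()[1]) * 1024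
--         elif raw_line.startswith("Threads:"):
--             values["threads"] = int(raw_line.split()[1])
--     return values
-- ===== SOURCE B (Python) =====
-- def parse_proc_status_text(text: str) -> dict[str, int]:
--     lines = text.splitlines()
--     return {
--         key: ([0] + [int(line.split()[1]) * mult
--                      for line in lines if line.startswith(prefix)])[-1]
--         for prefix, key, mult in (
--             ("VmRSS:", "rss_bytes", 1024),
--             ("VmSize:", "vms_bytes", 1024),
--             ("Threads:", "threads", 1),
--         )
--     }
-- ===== Notes on version B (the rewrite author's own statement) =====
-- stated objective: idiomatic
-- what changed: A's single pass with a per-line if/elif branch chain mutating a dict is replaced by a data-driven per-field computation: for each (prefix, key, multiplier) table entry B filters the matching lines, parses them all and keeps the last value (defaulting to 0), building the dict by comprehension.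
import Mathlib
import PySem

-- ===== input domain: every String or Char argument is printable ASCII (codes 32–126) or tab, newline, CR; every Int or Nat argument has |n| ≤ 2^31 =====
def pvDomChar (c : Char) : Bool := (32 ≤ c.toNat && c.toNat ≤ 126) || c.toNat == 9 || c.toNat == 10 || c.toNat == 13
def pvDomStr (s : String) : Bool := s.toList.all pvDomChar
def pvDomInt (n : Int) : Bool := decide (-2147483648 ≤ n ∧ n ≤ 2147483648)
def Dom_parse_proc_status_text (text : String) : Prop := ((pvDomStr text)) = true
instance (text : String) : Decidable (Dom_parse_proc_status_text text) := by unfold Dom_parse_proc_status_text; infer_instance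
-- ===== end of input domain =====

-- B replaces A's per-line if/elif branch chain by a per-field pass: for each (prefix, key, multiplier)
-- table entry it takes the last parsed value among the matching lines (idiomatic, data-driven; same cost).

-- ===== PORT A =====
-- int(raw_line.split()[1]); the .getD defaults are unreachable under Pre_ (Python raises there)
def pvParseField (line : String) : Int :=
  (PySem.Int.ofStr? (PySem.List.pyGetD (PySem.Str.split₀ line) 1 "")).getD 0

def pvStepA (d : PySem.Dict String Int) (line : String) : PySem.Dict String Int :=
  if PySem.Str.startswith line "VmRSS:" then d.insert "rss_bytes" (pvParseField line * 1024)
  else if PySem.Str.startswith line "VmSize:" then d.insert "vms_bytes" (pvParseField line * 1024)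
  else if PySem.Str.startswith line "Threads:" then d.insert "threads" (pvParseField line)
  else d

def parse_proc_status_text (text : String) : List (String × Int) :=
  ((PySem.Str.splitlines text).foldl pvStepA
    (PySem.Dict.ofList [("rss_bytes", 0), ("vms_bytes", 0), ("threads", 0)])).items

-- ===== PORT B =====
-- ([0] + [int(line.split()[1]) * mult for line in lines if line.startswith(prefix)])[-1]
def pvAltEntry (lines : List String) (pfx : String) (mult : Int) : Int :=
  PySem.List.pyGetD
    ((0 : Int) :: (lines.filter (fun l => PySem.Str.startswith l pfx)).map
      (fun l => (PySem.Int.ofStr? (PySem.List.pyGetD (PySem.Str.split₀ l) 1 "")).getD 0 * mult))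
    (-1) 0

def parse_proc_status_text_alt (text : String) : List (String × Int) :=
  let lines := PySem.Str.splitlines text
  [("VmRSS:", "rss_bytes", (1024 : Int)), ("VmSize:", "vms_bytes", 1024),
   ("Threads:", "threads", 1)].map (fun e => (e.2.1, pvAltEntry lines e.1 e.2.2))

-- ===== PRECONDITION & SPEC =====
-- Pre_ excludes exactly the inputs where Python A raises: a line starting with one of the three
-- prefixes but whose second whitespace token is missing (IndexError) or not an int literal (ValueError).
def pvLineOk (line : String) : Bool :=
  !(PySem.Str.startswith line "VmRSS:" || PySem.Str.startswith line "VmSize:"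
      || PySem.Str.startswith line "Threads:")
  || (decide (1 < (PySem.Str.split₀ line).length)
      && (PySem.Int.ofStr? (PySem.List.pyGetD (PySem.Str.split₀ line) 1 "")).isSome)

def Pre_parse_proc_status_text (text : String) : Prop :=
  ((PySem.Str.splitlines text).all pvLineOk) = true
instance (text : String) : Decidable (Pre_parse_proc_status_text text) := by
  unfold Pre_parse_proc_status_text; infer_instance

def pvWitness_parse_proc_status_text : String := "VmRSS:\t  10 kB\nVmSize: 20 kB\nx\nThreads: 3"

def Spec_parse_proc_status_text (text : String) (out : List (String × Int)) : Prop :=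
  out = parse_proc_status_text_alt text
instance (text : String) (out : List (String × Int)) : Decidable (Spec_parse_proc_status_text text out) := by
  unfold Spec_parse_proc_status_text; infer_instance

-- ===== CLAIM (what is proved, stated in full; the proofs are below) =====
def Claim_equal_parse_proc_status_text : Prop := ∀ (text : String), Dom_parse_proc_status_text text → Pre_parse_proc_status_text text → Spec_parse_proc_status_text text (parse_proc_status_text text)

-- ===== LEMMAS AND PROOFS =====

-- last value parsed from the lines matching pfx, or acc if none matches
def pvLast (lines : List String) (pfx : String) (mult acc : Int) : Int :=
  ((lines.filter (fun l => PySem.Str.startswith l pfx)).map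
     (fun l => (PySem.Int.ofStr? (PySem.List.pyGetD (PySem.Str.split₀ l) 1 "")).getD 0 * mult)).getLastD acc

-- the three prefixes are mutually exclusive: no line starts with two of them
theorem pv_excl (l p q : String) (hpq : ¬ (p.toList <+: q.toList)) (hqp : ¬ (q.toList <+: p.toList))
    (h : PySem.Str.startswith l p = true) : PySem.Str.startswith l q = false := by
  cases hq : PySem.Str.startswith l q with
  | false => rfl
  | true =>
    simp only [PySem.Str.startswith_eq, PySem.Chars.startswith_iff] at h hq
    rcases List.prefix_or_prefix_of_prefix h hq with hc | hc
    · exact absurd hc hpq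
    · exact absurd hc hqp

theorem pvLast_cons_pos (l : String) (ls : List String) (pfx : String) (mult acc : Int)
    (h : PySem.Str.startswith l pfx = true) :
    pvLast (l :: ls) pfx mult acc
      = pvLast ls pfx mult ((PySem.Int.ofStr? (PySem.List.pyGetD (PySem.Str.split₀ l) 1 "")).getD 0 * mult) := by
  unfold pvLast
  simp only [List.filter_cons, h, if_true, List.map_cons, List.getLastD_cons]

theorem pvLast_cons_neg (l : String) (ls : List String) (pfx : String) (mult acc : Int)
    (h : PySem.Str.startswith l pfx = false) :
    pvLast (l :: ls) pfx mult acc = pvLast ls pfx mult acc := by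
  unfold pvLast
  simp only [List.filter_cons, h, if_false, Bool.false_eq_true]

theorem pv_ins_rss (r v t x : Int) :
    (PySem.Dict.mk [("rss_bytes", r), ("vms_bytes", v), ("threads", t)]).insert "rss_bytes" x
      = PySem.Dict.mk [("rss_bytes", x), ("vms_bytes", v), ("threads", t)] := by
  simp [PySem.Dict.insert, PySem.Dict.contains]

theorem pv_ins_vms (r v t x : Int) :
    (PySem.Dict.mk [("rss_bytes", r), ("vms_bytes", v), ("threads", t)]).insert "vms_bytes" x
      = PySem.Dict.mk [("rss_bytes", r), ("vms_bytes", x), ("threads", t)] := by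
  simp [PySem.Dict.insert, PySem.Dict.contains]

theorem pv_ins_thr (r v t x : Int) :
    (PySem.Dict.mk [("rss_bytes", r), ("vms_bytes", v), ("threads", t)]).insert "threads" x
      = PySem.Dict.mk [("rss_bytes", r), ("vms_bytes", v), ("threads", x)] := by
  simp [PySem.Dict.insert, PySem.Dict.contains]

theorem pv_fold (lines : List String) (r v t : Int) :
    lines.foldl pvStepA (PySem.Dict.mk [("rss_bytes", r), ("vms_bytes", v), ("threads", t)])
    = PySem.Dict.mk [("rss_bytes", pvLast lines "VmRSS:" 1024 r),
                     ("vms_bytes", pvLast lines "VmSize:" 1024 v),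
                     ("threads", pvLast lines "Threads:" 1 t)] := by
  induction lines generalizing r v t with
  | nil => simp [pvLast]
  | cons l ls ih =>
    rw [List.foldl_cons]
    by_cases h1 : PySem.Str.startswith l "VmRSS:" = true
    · have h2 := pv_excl l "VmRSS:" "VmSize:" (by decide) (by decide) h1
      have h3 := pv_excl l "VmRSS:" "Threads:" (by decide) (by decide) h1
      have hstep : pvStepA (PySem.Dict.mk [("rss_bytes", r), ("vms_bytes", v), ("threads", t)]) l
          = PySem.Dict.mk [("rss_bytes", pvParseField l * 1024), ("vms_bytes", v), ("threads", t)] := by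
        unfold pvStepA; rw [if_pos h1]; exact pv_ins_rss r v t _
      rw [hstep, ih, pvLast_cons_pos _ _ _ _ _ h1, pvLast_cons_neg _ _ _ _ _ h2,
        pvLast_cons_neg _ _ _ _ _ h3, pvParseField]
    · replace h1 : PySem.Str.startswith l "VmRSS:" = false := by
        cases hb : PySem.Str.startswith l "VmRSS:" <;> simp_all
      by_cases h2 : PySem.Str.startswith l "VmSize:" = true
      · have h3 := pv_excl l "VmSize:" "Threads:" (by decide) (by decide) h2
        have hstep : pvStepA (PySem.Dict.mk [("rss_bytes", r), ("vms_bytes", v), ("threads", t)]) l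
            = PySem.Dict.mk [("rss_bytes", r), ("vms_bytes", pvParseField l * 1024), ("threads", t)] := by
          unfold pvStepA; rw [if_neg (by rw [h1]; exact Bool.false_ne_true), if_pos h2]; exact pv_ins_vms r v t _
        rw [hstep, ih, pvLast_cons_neg _ _ _ _ _ h1, pvLast_cons_pos _ _ _ _ _ h2,
          pvLast_cons_neg _ _ _ _ _ h3, pvParseField]
      · replace h2 : PySem.Str.startswith l "VmSize:" = false := by
          cases hb : PySem.Str.startswith l "VmSize:" <;> simp_all
        by_cases h3 : PySem.Str.startswith l "Threads:" = true
        · have hstep : pvStepA (PySem.Dict.mk [("rss_bytes", r), ("vms_bytes", v), ("threads", t)]) l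
              = PySem.Dict.mk [("rss_bytes", r), ("vms_bytes", v), ("threads", pvParseField l)] := by
            unfold pvStepA
            rw [if_neg (by rw [h1]; exact Bool.false_ne_true), if_neg (by rw [h2]; exact Bool.false_ne_true), if_pos h3]; exact pv_ins_thr r v t _
          rw [hstep, ih, pvLast_cons_neg _ _ _ _ _ h1, pvLast_cons_neg _ _ _ _ _ h2,
            pvLast_cons_pos _ _ _ _ _ h3, pvParseField, mul_one]
        · replace h3 : PySem.Str.startswith l "Threads:" = false := by
            cases hb : PySem.Str.startswith l "Threads:" <;> simp_all
          have hstep : pvStepA (PySem.Dict.mk [("rss_bytes", r), ("vms_bytes", v), ("threads", t)]) l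
              = PySem.Dict.mk [("rss_bytes", r), ("vms_bytes", v), ("threads", t)] := by
            unfold pvStepA
            rw [if_neg (by rw [h1]; exact Bool.false_ne_true), if_neg (by rw [h2]; exact Bool.false_ne_true), if_neg (by rw [h3]; exact Bool.false_ne_true)]
          rw [hstep, ih, pvLast_cons_neg _ _ _ _ _ h1, pvLast_cons_neg _ _ _ _ _ h2,
            pvLast_cons_neg _ _ _ _ _ h3]

theorem pv_alt_eq_last (lines : List String) (pfx : String) (mult : Int) :
    pvAltEntry lines pfx mult = pvLast lines pfx mult 0 := by
  unfold pvAltEntry pvLast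
  rw [PySem.List.pyGetD_neg_one _ 0 (by simp)]
  exact List.getLast_eq_getLastD _

-- ===== VERDICT (by name: the statement is the Claim_ definition above) =====
theorem parse_proc_status_text_spec : Claim_equal_parse_proc_status_text := by
  intro text _ _
  unfold Spec_parse_proc_status_text parse_proc_status_text parse_proc_status_text_alt
  have h0 : PySem.Dict.ofList ([("rss_bytes", (0:Int)), ("vms_bytes", 0), ("threads", 0)])
      = PySem.Dict.mk [("rss_bytes", 0), ("vms_bytes", 0), ("threads", 0)] := by decide
  rw [h0, pv_fold]
  simp [pv_alt_eq_last]
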